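-- pv_equiv track=rewrite | github.com/Ashiq-am/Data-Structures-Algorithm | 1.Python Algorithms/11.Dynamic Programming/4.Intermediate Problems/13.Temple Offerings/1.Naive Approach.py | offeringNumber
-- ===== SOURCE A (Python) =====
-- def offeringNumber(n, templeHeight):
--     sum = 0  # Initialize result
--
--     # Go through all templs one by one
--     for i in range(n):
--
--         # Go to left while height
--         # keeps increasing
--         left = 0
--         right = 0
--         for j in range(i - 1, -1, -1):
--             if (templeHeight[j] < templeHeight[j + 1]):
--                 left += 1
--             else:
--                 break
--
--         # Go to right while height
--         # keeps increasing
--         for j in range(i + 1, n):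
--             if (templeHeight[j] < templeHeight[j - 1]):
--                 right += 1
--             else:
--                 break
--
--         # This temple should offer maximum
--         # of two values to follow the rule.
--         sum += max(right, left) + 1
--     return sum
-- ===== SOURCE B (Python) =====
-- def _runs(h):
--     # run[i] = length of the strictly increasing run ending at i (one linear pass)
--     out = []
--     run = 0
--     prev = None
--     for x in h:
--         run = run + 1 if prev is not None and prev < x else 0
--         out.append(run)
--         prev = x
--     return out
--
--
-- def offeringNumber(n, templeHeight):
--     if n <= 0:
--         return 0
--     h = templeHeight[:n]
--     left = _runs(h)
--     right = _runs(h[::-1])[::-1]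
--     return sum(max(l, r) + 1 for l, r in zip(left, right))
-- ===== Notes on version B (the rewrite author's own statement) =====
-- stated objective: faster
-- what changed: Replaces the per-temple left/right rescans with three linear passes: one pass computing increasing-run lengths from the left, the same pass on the reversed list for the right, then one zip-sum of max+1.
-- intended difference: On n = 1 with an empty temple list A returns 1, counting a temple that does not exist; B returns 0, the intended total of offerings for no temples. — e.g. on offeringNumber(1, []): A returns 1, B returns 0
import Mathlib
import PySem

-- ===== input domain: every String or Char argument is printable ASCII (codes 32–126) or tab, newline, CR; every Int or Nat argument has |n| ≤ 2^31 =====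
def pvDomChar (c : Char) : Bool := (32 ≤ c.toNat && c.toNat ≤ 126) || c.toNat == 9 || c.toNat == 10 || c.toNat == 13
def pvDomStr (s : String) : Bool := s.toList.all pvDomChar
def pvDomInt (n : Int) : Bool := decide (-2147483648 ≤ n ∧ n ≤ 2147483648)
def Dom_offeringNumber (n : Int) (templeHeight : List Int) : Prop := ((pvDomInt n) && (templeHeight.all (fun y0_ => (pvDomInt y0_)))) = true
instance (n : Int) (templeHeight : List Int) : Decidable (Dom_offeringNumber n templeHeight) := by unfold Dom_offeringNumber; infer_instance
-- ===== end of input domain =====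

-- B replaces A's per-temple left/right rescans (O(n^2)) by three linear passes (run lengths
-- from the left, same pass on the reversed list, then a zip-sum of max+1).

-- ===== PORT A =====
-- templeHeight[j], total under Pre_ (all accessed indices are in range there)
def pg (h : List Int) (j : Int) : Int := (PySem.List.pyGet? h j).getD 0

-- 'for j in range(i-1, -1, -1): if h[j] < h[j+1]: left += 1 else: break' — fuel = i iterations
def goLeftAux (h : List Int) (j : Int) : Nat → Int
  | 0 => 0
  | k + 1 => if pg h j < pg h (j + 1) then 1 + goLeftAux h (j - 1) k else 0

-- 'for j in range(i+1, n): if h[j] < h[j-1]: right += 1 else: break' — fuel = n-(i+1) iterations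
def goRightAux (h : List Int) (j : Int) : Nat → Int
  | 0 => 0
  | k + 1 => if pg h j < pg h (j - 1) then 1 + goRightAux h (j + 1) k else 0

def offeringNumber (n : Int) (templeHeight : List Int) : Int :=
  (PySem.List.pyRange 0 n 1).foldl
    (fun s i =>
      s + (max (goRightAux templeHeight (i + 1) (n - (i + 1)).toNat)
               (goLeftAux templeHeight (i - 1) i.toNat) + 1)) 0

-- ===== PORT B =====
-- one linear pass: run[i] = length of the strictly increasing run ending at i
def runsAux (prev : Option Int) (run : Int) : List Int → List Int
  | [] => []
  | x :: xs =>
    let r : Int := match prev with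
      | some p => if p < x then run + 1 else 0
      | none => 0
    r :: runsAux (some x) r xs

def runs (h : List Int) : List Int := runsAux none 0 h

-- sum(max(l, r) + 1 for l, r in zip(left, right))
def sumZip : List Int → List Int → Int
  | l :: ls, r :: rs => (max l r + 1) + sumZip ls rs
  | _, _ => 0

def offeringNumber_alt (n : Int) (templeHeight : List Int) : Int :=
  if n ≤ 0 then 0
  else
    let h := PySem.List.slice templeHeight none (some n)
    sumZip (runs h) ((runs h.reverse).reverse)

-- ===== PRECONDITION & SPEC =====
-- A raises IndexError exactly when 2 ≤ n and the list is shorter than n; Pre_ excludes those inputs.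
def Pre_offeringNumber (n : Int) (templeHeight : List Int) : Prop :=
  n ≤ 1 ∨ n ≤ (templeHeight.length : Int)
instance (n : Int) (templeHeight : List Int) : Decidable (Pre_offeringNumber n templeHeight) := by
  unfold Pre_offeringNumber; infer_instance

def pvWitness_offeringNumber : Int × List Int := (4, [1, 2, 2, 1])

-- On n = 1 with an empty list, A returns 1 (it counts a temple that does not exist); B returns 0,
-- the intended total of offerings for no temples.
def D_offeringNumber (n : Int) (templeHeight : List Int) : Prop :=
  n = 1 ∧ templeHeight = []
instance (n : Int) (templeHeight : List Int) : Decidable (D_offeringNumber n templeHeight) := by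
  unfold D_offeringNumber; infer_instance

def Spec_offeringNumber (n : Int) (templeHeight : List Int) (out : Int) : Prop :=
  ¬ D_offeringNumber n templeHeight → out = offeringNumber_alt n templeHeight
instance (n : Int) (templeHeight : List Int) (out : Int) : Decidable (Spec_offeringNumber n templeHeight out) := by
  unfold Spec_offeringNumber; infer_instance

def pvDiffWitness_offeringNumber : Int × List Int := (1, [])
def pvDiffWitnessOut_offeringNumber : Int × Int := (1, 0)

-- ===== CLAIM (what is proved, stated in full; the proofs are below) =====
def Claim_unchanged_offeringNumber : Prop := ∀ (n : Int) (templeHeight : List Int), Dom_offeringNumber n templeHeight → Pre_offeringNumber n templeHeight → Spec_offeringNumber n templeHeight (offeringNumber n templeHeight)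
def Claim_changed_offeringNumber : Prop := Dom_offeringNumber (pvDiffWitness_offeringNumber.1) (pvDiffWitness_offeringNumber.2) ∧ Pre_offeringNumber (pvDiffWitness_offeringNumber.1) (pvDiffWitness_offeringNumber.2) ∧ D_offeringNumber (pvDiffWitness_offeringNumber.1) (pvDiffWitness_offeringNumber.2) ∧ offeringNumber (pvDiffWitness_offeringNumber.1) (pvDiffWitness_offeringNumber.2) = pvDiffWitnessOut_offeringNumber.1 ∧ offeringNumber_alt (pvDiffWitness_offeringNumber.1) (pvDiffWitness_offeringNumber.2) = pvDiffWitnessOut_offeringNumber.2 ∧ pvDiffWitnessOut_offeringNumber.1 ≠ pvDiffWitnessOut_offeringNumber.2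
def Claim_exact_offeringNumber : Prop := ∀ (n : Int) (templeHeight : List Int), Dom_offeringNumber n templeHeight → Pre_offeringNumber n templeHeight → D_offeringNumber n templeHeight → offeringNumber n templeHeight ≠ offeringNumber_alt n templeHeight

-- ===== LEMMAS AND PROOFS =====

theorem pg_natCast (h : List Int) (k : Nat) : pg h (k : Int) = h.getD k 0 := by
  simp [pg, PySem.List.pyGet?_natCast, List.getD]

theorem pg_take (th : List Int) (m : Nat) (j : Int)
    (h0 : 0 ≤ j) (h1 : j < (m : Int)) : pg (th.take m) j = pg th j := by
  obtain ⟨k, rfl⟩ : ∃ k : Nat, j = (k : Int) := ⟨j.toNat, by omega⟩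
  have hk : k < m := by exact_mod_cast h1
  rw [pg_natCast, pg_natCast]
  simp [List.getD, hk]

theorem goLeftAux_take (th : List Int) (m : Nat) :
    ∀ (k : Nat) (j : Int), (k : Int) ≤ j + 1 → j + 1 < (m : Int) →
      goLeftAux (th.take m) j k = goLeftAux th j k := by
  intro k
  induction k with
  | zero => intro j _ _; rfl
  | succ k ih =>
    intro j hk hj
    have h0 : 0 ≤ j := by push_cast at hk; omega
    rw [goLeftAux, goLeftAux, pg_take th m j h0 (by omega),
        pg_take th m (j+1) (by omega) (by omega)]
    by_cases hc : pg th j < pg th (j + 1)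
    · simp only [hc, if_true]
      rw [ih (j - 1) (by push_cast at hk ⊢; omega) (by omega)]
    · simp [hc]

theorem goRightAux_take (th : List Int) (m : Nat) :
    ∀ (k : Nat) (j : Int), 1 ≤ j → j + (k : Int) ≤ (m : Int) →
      goRightAux (th.take m) j k = goRightAux th j k := by
  intro k
  induction k with
  | zero => intro j _ _; rfl
  | succ k ih =>
    intro j hj hk
    rw [goRightAux, goRightAux, pg_take th m j (by omega) (by push_cast at hk; omega),
        pg_take th m (j-1) (by omega) (by push_cast at hk; omega)]
    by_cases hc : pg th j < pg th (j - 1)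
    · simp only [hc, if_true]
      rw [ih (j + 1) (by omega) (by push_cast at hk ⊢; omega)]
    · simp [hc]

theorem runsAux_spec : ∀ (suf : List Int) (h : List Int) (i : Nat),
    i + 1 ≤ h.length → h.drop (i + 1) = suf →
    runsAux (some (h.getD i 0)) (goLeftAux h ((i : Int) - 1) i) suf
      = (List.range suf.length).map (fun k => goLeftAux h ((↑(i + 1 + k) : Int) - 1) (i + 1 + k)) := by
  intro suf
  induction suf with
  | nil => intro h i _ _; rfl
  | cons x xs ih =>
    intro h i hlen hdrop
    have hget : h[i+1]? = some x := by
      have h0 : (h.drop (i+1))[0]? = h[(i+1)+0]? := List.getElem?_drop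
      rw [hdrop] at h0; simpa using h0.symm
    have hlen2 : i + 1 < h.length := by
      obtain ⟨hlt, -⟩ := List.getElem?_eq_some_iff.mp hget; omega
    have hx : h.getD (i+1) 0 = x := by simp [List.getD, hget]
    have hdrop2 : h.drop (i + 1 + 1) = xs := by
      have hd : (h.drop (i+1)).drop 1 = h.drop ((i+1)+1) := List.drop_drop
      rw [hdrop] at hd; simpa using hd.symm
    have hr : (if h.getD i 0 < x then goLeftAux h ((i : Int) - 1) i + 1 else 0)
        = goLeftAux h ((↑(i+1) : Int) - 1) (i + 1) := by
      rw [goLeftAux]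
      have e1 : ((↑(i+1) : Int) - 1) = (i : Int) := by push_cast; ring
      have e2 : ((i : Int)) + 1 = ((i+1 : Nat) : Int) := by push_cast; ring
      rw [e1, e2, pg_natCast, pg_natCast, hx]
      simp only [List.getD]
      by_cases hc : h[i]?.getD 0 < x
      · simp [hc, add_comm]
      · simp [hc]
    simp only [runsAux]
    rw [hr]
    have hih := ih h (i+1) (by omega) hdrop2
    rw [hx] at hih
    rw [hih]
    rw [List.length_cons, List.range_succ_eq_map, List.map_cons, List.map_map]
    have hk : ∀ k : Nat, i + 1 + (k + 1) = i + 1 + 1 + k := by omega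
    refine congrArg₂ List.cons (by norm_num) ?_
    refine (List.map_congr_left fun k _ => ?_).symm
    simp only [Function.comp_apply, Nat.succ_eq_add_one, hk k]

theorem runs_map (h : List Int) :
    runs h = (List.range h.length).map (fun i : Nat => goLeftAux h ((i : Int) - 1) i) := by
  cases h with
  | nil => rfl
  | cons x xs =>
    show runsAux none 0 (x :: xs) = _
    simp only [runsAux]
    have hs := runsAux_spec xs (x :: xs) 0 (by simp) (by simp)
    simp only [Nat.cast_zero, show (x :: xs).getD 0 0 = x from rfl,
      show goLeftAux (x :: xs) ((0 : Int) - 1) 0 = 0 from rfl, Nat.zero_add] at hs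
    rw [hs]
    rw [List.length_cons, List.range_succ_eq_map, List.map_cons, List.map_map]
    refine congrArg₂ List.cons rfl ?_
    refine (List.map_congr_left fun k _ => ?_).symm
    simp only [Function.comp_apply, Nat.succ_eq_add_one]
    congr 1
    · push_cast; ring
    · omega

theorem pg_reverse (h : List Int) (j : Int) (h0 : 0 ≤ j) (h1 : j < (h.length : Int)) :
    pg h.reverse j = pg h ((h.length : Int) - 1 - j) := by
  obtain ⟨k, rfl⟩ : ∃ k : Nat, j = (k : Int) := ⟨j.toNat, by omega⟩
  have hk : k < h.length := by exact_mod_cast h1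
  have e : (h.length : Int) - 1 - (k : Int) = ((h.length - 1 - k : Nat) : Int) := by omega
  rw [e, pg_natCast, pg_natCast]
  simp only [List.getD]
  rw [List.getElem?_reverse hk]

theorem mirror (h : List Int) :
    ∀ (k : Nat) (j : Int), (k : Int) ≤ j + 1 → j + 1 ≤ (h.length : Int) - 1 →
      goLeftAux h.reverse j k = goRightAux h ((h.length : Int) - 1 - j) k := by
  intro k
  induction k with
  | zero => intro j _ _; rfl
  | succ k ih =>
    intro j hk hj
    have h0 : 0 ≤ j := by push_cast at hk; omega
    rw [goLeftAux, goRightAux]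
    rw [pg_reverse h j h0 (by omega), pg_reverse h (j+1) (by omega) (by omega)]
    have e1 : (h.length : Int) - 1 - (j + 1) = ((h.length : Int) - 1 - j) - 1 := by ring
    rw [e1]
    by_cases hc : pg h ((h.length : Int) - 1 - j) < pg h ((h.length : Int) - 1 - j - 1)
    · simp only [hc, if_true]
      have e2 : (h.length : Int) - 1 - j + 1 = (h.length : Int) - 1 - (j - 1) := by ring
      rw [e2, ih (j - 1) (by push_cast at hk ⊢; omega) (by omega)]
    · simp [hc]

theorem rev_runs (h : List Int) :
    (runs h.reverse).reverse
      = (List.range h.length).map (fun i : Nat => goRightAux h ((i : Int) + 1) (h.length - 1 - i)) := by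
  rw [runs_map h.reverse, List.length_reverse]
  apply List.ext_getElem
  · simp
  intro i h1 h2
  simp only [List.length_reverse, List.length_map, List.length_range] at h1 h2
  rw [List.getElem_reverse, List.getElem_map, List.getElem_map, List.getElem_range, List.getElem_range]
  simp only [List.length_map, List.length_range]
  have hmx := mirror h (h.length - 1 - i) ((↑(h.length - 1 - i) : Int) - 1)
    (by omega) (by omega)
  rw [hmx]
  congr 1
  omega

theorem sumZip_map (f g : Nat → Int) :
    ∀ l : List Nat, sumZip (l.map f) (l.map g) = (l.map (fun i => max (f i) (g i) + 1)).sum := by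
  intro l; induction l with
  | nil => simp [sumZip]
  | cons x xs ih => simp [sumZip, ih]

-- ===== VERDICT (by name: the statement is the Claim_ definition above) =====
theorem offeringNumber_spec : Claim_unchanged_offeringNumber := by
  intro n th hdom hpre hnD
  show offeringNumber n th = offeringNumber_alt n th
  by_cases hn : n ≤ 0
  · unfold offeringNumber offeringNumber_alt
    rw [PySem.List.pyRange_one_eq_nil (by omega), if_pos hn]
    rfl
  · have hn2 : 0 < n := by omega
    have hm : n.toNat ≤ th.length := by
      unfold Pre_offeringNumber at hpre
      unfold D_offeringNumber at hnD
      rcases hpre with h1 | h2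
      · have hn1 : n = 1 := by omega
        by_contra hbad
        have : th.length = 0 := by omega
        exact hnD ⟨hn1, List.length_eq_zero_iff.mp this⟩
      · omega
    set m := n.toNat with hmdef
    have hnm : n = (m : Int) := by omega
    unfold offeringNumber offeringNumber_alt
    rw [if_neg (by omega)]
    show _ = sumZip (runs (PySem.List.slice th none (some n)))
        ((runs (PySem.List.slice th none (some n)).reverse).reverse)
    rw [PySem.List.slice_to th (show (0:Int) ≤ n by omega)]
    have hlen : (th.take m).length = m := by simp [List.length_take]; omega
    rw [runs_map (th.take m), rev_runs (th.take m), hlen, sumZip_map]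
    rw [hnm, PySem.List.pyRange_one, PySem.List.foldl_add, List.map_map, zero_add]
    refine congrArg List.sum (List.map_congr_left fun i hi => ?_)
    have him : i < m := List.mem_range.mp hi
    simp only [Function.comp_apply, zero_add, Int.toNat_natCast]
    have e1 : ((m : Int) - ((i : Int) + 1)).toNat = m - 1 - i := by omega
    rw [e1]
    rw [← goLeftAux_take th m i ((i : Int) - 1) (by omega) (by omega)]
    rw [← goRightAux_take th m (m - 1 - i) ((i : Int) + 1) (by omega) (by omega)]
    rw [max_comm]

theorem offeringNumber_changed : Claim_changed_offeringNumber := by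
  unfold Claim_changed_offeringNumber; decide

theorem offeringNumber_tight : Claim_exact_offeringNumber := by
  intro n th _ _ hD
  obtain ⟨rfl, rfl⟩ := hD
  decide
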